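-- pv_equiv track=rewrite | github.com/nishio/nothanks | nothanks_cui.py | runs_str
-- ===== SOURCE A (Python) =====
-- from typing import List, Set, Optional, Dict, Tuple
--
-- def runs_str(cards: Set[int]) -> str:
--     """Pretty-print runs like '8 | 13-15 | 17'."""
--     if not cards:
--         return "(none)"
--     arr = sorted(cards)
--     runs: List[Tuple[int, int]] = []
--     start = prev = arr[0]
--     for x in arr[1:]:
--         if x == prev + 1:
--             prev = x
--         else:
--             runs.append((start, prev))
--             start = prev = x
--     runs.append((start, prev))
--     out = []
--     for a, b in runs:
--         out.append(str(a) if a == b else f"{a}-{b}")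
--     return " | ".join(out)
-- ===== SOURCE B (Python) =====
-- # Idiomatic rewrite: group the sorted values by the value-minus-index key
-- # (constant exactly on a consecutive run) instead of tracking prev/start by hand.
-- def runs_str(cards):
--     """Pretty-print runs like '8 | 13-15 | 17'."""
--     if not cards:
--         return "(none)"
--     groups = {}
--     for i, v in enumerate(sorted(cards)):
--         groups.setdefault(v - i, []).append(v)
--     return " | ".join(str(g[0]) if len(g) == 1 else f"{g[0]}-{g[-1]}"
--                       for g in groups.values())
-- ===== Notes on version B (the rewrite author's own statement) =====
-- stated objective: idiomatic
-- what changed: Replaces the hand-written prev/start run-tracking loop and explicit runs list with the value-minus-index grouping idiom: consecutive integers share the key v-i, so a single insertion-ordered dict of setdefault-appended groups yields the runs, and each piece is emitted from a group's first and last element.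
import Mathlib
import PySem

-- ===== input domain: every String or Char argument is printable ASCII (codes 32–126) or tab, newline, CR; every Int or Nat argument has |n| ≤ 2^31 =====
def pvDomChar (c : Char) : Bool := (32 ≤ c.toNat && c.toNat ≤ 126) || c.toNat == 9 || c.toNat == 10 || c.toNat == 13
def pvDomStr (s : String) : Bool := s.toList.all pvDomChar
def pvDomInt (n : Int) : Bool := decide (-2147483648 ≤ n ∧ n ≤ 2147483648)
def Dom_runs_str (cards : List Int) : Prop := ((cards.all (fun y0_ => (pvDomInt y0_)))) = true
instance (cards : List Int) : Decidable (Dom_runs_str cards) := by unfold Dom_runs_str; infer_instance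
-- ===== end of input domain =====

-- B replaces A's hand-tracked prev/start run loop by the idiomatic value-minus-index
-- grouping (consecutive integers share the key v-i, collected in an insertion-ordered dict).


-- ===== PORT A =====
def runs_str (cards : List Int) : String :=
  if cards.isEmpty then "(none)"
  else
    match PySem.List.sorted cards (fun x => x) with
    | [] => "(none)"   -- unreachable (sorted of a nonempty list is nonempty): totality guard only
    | a0 :: rest =>
      let st := rest.foldl
        (fun (st : List (Int × Int) × Int × Int) x =>
          if x = st.2.2 + 1 then (st.1, st.2.1, x)
          else (st.1 ++ [(st.2.1, st.2.2)], x, x))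
        ([], a0, a0)
      let runsL := st.1 ++ [(st.2.1, st.2.2)]
      let out := runsL.foldl
        (fun out p =>
          out ++ [if p.1 = p.2 then PySem.Int.toStr p.1
                  else PySem.Int.toStr p.1 ++ "-" ++ PySem.Int.toStr p.2]) []
      PySem.Str.join " | " out

-- ===== PORT B =====
def runs_str_alt (cards : List Int) : String :=
  if cards.isEmpty then "(none)"
  else
    let groups := (PySem.List.enumerate (PySem.List.sorted cards (fun x => x))).foldl
      (fun (d : PySem.Dict Int (List Int)) p =>
        d.modify (p.2 - p.1) [] (fun g => g ++ [p.2]))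
      PySem.Dict.empty
    PySem.Str.join " | " (groups.values.map (fun g =>
      if g.length = 1 then PySem.Int.toStr (PySem.List.pyGetD g 0 0)
      else PySem.Int.toStr (PySem.List.pyGetD g 0 0) ++ "-"
             ++ PySem.Int.toStr (PySem.List.pyGetD g (-1) 0)))

-- ===== PRECONDITION & SPEC =====
-- Python's parameter is a set; under the type convention the list holds its DISTINCT
-- elements, so Pre_ states exactly that representation invariant (no duplicates).
def Pre_runs_str (cards : List Int) : Prop := cards.Nodup
instance (cards : List Int) : Decidable (Pre_runs_str cards) := by unfold Pre_runs_str; infer_instance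
def pvWitness_runs_str : List Int := [8, 13, 14, 15, 17]
def Spec_runs_str (cards : List Int) (out : String) : Prop := out = runs_str_alt cards
instance (cards : List Int) (out : String) : Decidable (Spec_runs_str cards out) := by unfold Spec_runs_str; infer_instance

-- ===== CLAIM (what is proved, stated in full; the proofs are below) =====
def Claim_equal_runs_str : Prop := ∀ (cards : List Int), Dom_runs_str cards → Pre_runs_str cards → Spec_runs_str cards (runs_str cards)

-- ===== LEMMAS AND PROOFS =====

-- A's run accumulator, as a recursion: runs of x::xs continuing a run started at s with last element p.
def fruns : Int → Int → List Int → List (Int × Int)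
  | s, p, [] => [(s, p)]
  | s, p, x :: xs => if x = p + 1 then fruns s x xs else (s, p) :: fruns x x xs

-- Grouping of a list into maximal runs of consecutive integers (the common specification).
def groupsC : List Int → List (List Int)
  | [] => []
  | a :: t =>
    match groupsC t with
    | (b :: g) :: gs => if b = a + 1 then (a :: b :: g) :: gs else [a] :: (b :: g) :: gs
    | _ => [[a]]

-- B's keyed pair list [(v - i, v), …] and its grouping-by-key.
def keyed (l : List Int) (i : Int) : List (Int × Int) :=
  (PySem.List.enumerate l i).map (fun p => (p.2 - p.1, p.2))

def Gfun (P : List (Int × Int)) : List (List Int) :=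
  (PySem.Set.ofList (P.map (fun q => q.1))).map
    (fun k => (P.filter (fun q => q.1 == k)).map (fun q => q.2))

theorem keyed_nil (i : Int) : keyed [] i = [] := by
  simp [keyed, PySem.List.enumerate]

theorem keyed_cons (v : Int) (vs : List Int) (i : Int) :
    keyed (v :: vs) i = (v - i, v) :: keyed vs (i + 1) := by
  simp [keyed, PySem.List.enumerate]

theorem groupsC_cons (a x : Int) (xs g : List Int) (gs : List (List Int))
    (h : groupsC (x :: xs) = (x :: g) :: gs) :
    groupsC (a :: x :: xs)
      = if x = a + 1 then (a :: x :: g) :: gs else [a] :: (x :: g) :: gs := by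
  conv_lhs => rw [show groupsC (a :: x :: xs)
    = (match groupsC (x :: xs) with
       | (b :: g) :: gs => if b = a + 1 then (a :: b :: g) :: gs else [a] :: (b :: g) :: gs
       | _ => [[a]]) from rfl, h]

theorem groupsC_shape (t : List Int) (a : Int) :
    ∃ g gs, groupsC (a :: t) = (a :: g) :: gs := by
  induction t generalizing a with
  | nil => exact ⟨[], [], rfl⟩
  | cons b t' ih =>
    obtain ⟨g, gs, h⟩ := ih b
    by_cases hb : b = a + 1
    · exact ⟨b :: g, gs, by rw [groupsC_cons a b t' g gs h, if_pos hb]⟩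
    · exact ⟨[], (b :: g) :: gs, by rw [groupsC_cons a b t' g gs h, if_neg hb]⟩

theorem getLastI_cons_cons (a b : Int) (t : List Int) :
    (a :: b :: t).getLastI = (b :: t).getLastI := by
  simp [List.getLastI_eq_getLast?_getD]

-- A's foldl, characterised by fruns.
theorem foldA (xs : List Int) : ∀ (r : List (Int × Int)) (s p : Int),
    (xs.foldl (fun (st : List (Int × Int) × Int × Int) x =>
        if x = st.2.2 + 1 then (st.1, st.2.1, x)
        else (st.1 ++ [(st.2.1, st.2.2)], x, x)) (r, s, p)).1
      ++ [((xs.foldl (fun (st : List (Int × Int) × Int × Int) x =>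
        if x = st.2.2 + 1 then (st.1, st.2.1, x)
        else (st.1 ++ [(st.2.1, st.2.2)], x, x)) (r, s, p)).2.1,
          (xs.foldl (fun (st : List (Int × Int) × Int × Int) x =>
        if x = st.2.2 + 1 then (st.1, st.2.1, x)
        else (st.1 ++ [(st.2.1, st.2.2)], x, x)) (r, s, p)).2.2)]
      = r ++ fruns s p xs := by
  induction xs with
  | nil => intro r s p; simp [fruns]
  | cons x xs ih =>
    intro r s p
    simp only [List.foldl_cons, fruns]
    by_cases h : x = p + 1 <;> simp [h, ih, List.append_assoc]

-- The start value only renames the first emitted run's left end.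
theorem fruns_start (xs : List Int) : ∀ (s s' p : Int),
    fruns s p xs = (s, ((fruns s' p xs).headI).2) :: (fruns s' p xs).tail := by
  induction xs with
  | nil => intro s s' p; simp [fruns]
  | cons x xs ih =>
    intro s s' p
    by_cases h : x = p + 1
    · simp only [fruns, if_pos h]; exact ih s s' x
    · simp [fruns, if_neg h]

-- A's runs are the (head, last) pairs of the consecutive groups.
theorem fruns_eq_groupsC (t : List Int) : ∀ (a : Int),
    fruns a a t = (groupsC (a :: t)).map (fun g => (g.headI, g.getLastI)) := by
  induction t with
  | nil => intro a; simp [fruns, groupsC, List.getLastI_eq_getLast?_getD]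
  | cons x xs ih =>
    intro a
    obtain ⟨g, gs, hshape⟩ := groupsC_shape xs x
    by_cases h : x = a + 1
    · have hx : fruns x x xs
          = (x, (x :: g).getLastI) :: gs.map (fun g => (g.headI, g.getLastI)) := by
        rw [ih x, hshape]; simp
      have hs := fruns_start xs a x x
      rw [hx] at hs
      simp only [List.headI_cons, List.tail_cons] at hs
      rw [show fruns a a (x :: xs) = fruns a x xs by simp [fruns, h], hs,
        groupsC_cons a x xs g gs hshape, if_pos h, List.map_cons]
      simp [getLastI_cons_cons]
    · rw [show fruns a a (x :: xs) = (a, a) :: fruns x x xs by simp [fruns, h],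
        ih x, hshape, groupsC_cons a x xs g gs hshape, if_neg h]
      simp [List.getLastI_eq_getLast?_getD]

-- Each consecutive group is nonempty with last = head + length - 1.
theorem groupsC_last (l : List Int) : ∀ g ∈ groupsC l,
    g ≠ [] ∧ g.getLastI = g.headI + (g.length : Int) - 1 := by
  induction l with
  | nil => intro g hg; simp [groupsC] at hg
  | cons a t ih =>
    intro g hg
    cases t with
    | nil =>
      simp [groupsC] at hg
      subst hg
      exact ⟨by simp, by simp [List.getLastI_eq_getLast?_getD]⟩
    | cons b t' =>
      obtain ⟨g0, gs, hshape⟩ := groupsC_shape t' b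
      by_cases hb : b = a + 1
      · rw [groupsC_cons a b t' g0 gs hshape, if_pos hb, List.mem_cons] at hg
        rcases hg with hg | hg
        · subst hg
          have h0 := ih (b :: g0) (by rw [hshape]; simp)
          refine ⟨by simp, ?_⟩
          rw [getLastI_cons_cons, h0.2]
          simp [hb]
          ring
        · exact ih g (by rw [hshape]; simp [hg])
      · rw [groupsC_cons a b t' g0 gs hshape, if_neg hb, List.mem_cons] at hg
        rcases hg with hg | hg
        · subst hg
          exact ⟨by simp, by simp [List.getLastI_eq_getLast?_getD]⟩
        · exact ih g (by rw [hshape]; exact hg)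

-- every key of the keyed list is ≥ head value − start index
theorem key_ge_head (l : List Int) : ∀ (v i : Int), (v :: l).Pairwise (· < ·) →
    ∀ q ∈ keyed (v :: l) i, v - i ≤ q.1 := by
  induction l with
  | nil =>
    intro v i _ q hq
    rw [keyed_cons, keyed_nil] at hq
    simp at hq
    simp [hq]
  | cons w ws ih =>
    intro v i hp q hq
    rw [keyed_cons] at hq
    rcases List.mem_cons.1 hq with hq | hq
    · simp [hq]
    · have hvw : v < w := (List.pairwise_cons.1 hp).1 w (by simp)
      have := ih w (i + 1) (List.pairwise_cons.1 hp).2 q hq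
      omega

-- prepending a fresh element to a Set-building fold
theorem foldl_add_cons_not_mem {l : List Int} (x : Int) (hx : x ∉ l) :
    ∀ s : List Int, List.foldl PySem.Set.add (x :: s) l = x :: List.foldl PySem.Set.add s l := by
  induction l with
  | nil => intro s; simp
  | cons y ys ih =>
    intro s
    have hxy : ¬ (y == x) = true := by simp; rintro rfl; exact hx (by simp)
    have h1 : PySem.Set.add (x :: s) y = x :: PySem.Set.add s y := by
      simp only [PySem.Set.add, PySem.Set.contains, List.contains_cons, hxy]
      split <;> simp_all
    rw [List.foldl_cons, h1, List.foldl_cons,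
      ih (fun h => hx (by simp [h])) (PySem.Set.add s y)]

theorem foldl_add_cons_exists (l : List Int) : ∀ (x : Int) (s : List Int),
    ∃ s', List.foldl PySem.Set.add (x :: s) l = x :: s' := by
  induction l with
  | nil => intro x s; exact ⟨s, rfl⟩
  | cons y ys ih =>
    intro x s
    rcases ih x (PySem.Set.add (x :: s) y).tail with ⟨s', hs'⟩
    have h1 : PySem.Set.add (x :: s) y = x :: (PySem.Set.add (x :: s) y).tail := by
      simp only [PySem.Set.add]
      split <;> simp
    rw [List.foldl_cons, h1, hs']
    exact ⟨s', rfl⟩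

-- B's grouping-by-key computes the consecutive groups (on a strictly increasing list).
theorem Gfun_keyed_eq_groupsC (t : List Int) : ∀ (a i : Int), (a :: t).Pairwise (· < ·) →
    Gfun (keyed (a :: t) i) = groupsC (a :: t) := by
  induction t with
  | nil =>
    intro a i _
    rw [keyed_cons, keyed_nil]
    simp [Gfun, groupsC, PySem.Set.ofList, PySem.Set.add, PySem.Set.contains, PySem.Set.empty]
  | cons x xs ih =>
    intro a i hp
    have hax : a < x := (List.pairwise_cons.1 hp).1 x (by simp)
    have hpt : (x :: xs).Pairwise (· < ·) := (List.pairwise_cons.1 hp).2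
    have ihx := ih x (i + 1) hpt
    obtain ⟨g, gs, hshape⟩ := groupsC_shape xs x
    rw [keyed_cons]
    by_cases h : x = a + 1
    · -- same key a - i continues the run
      have hkey : x - (i + 1) = a - i := by omega
      have hK : keyed (x :: xs) (i + 1) = (a - i, x) :: keyed xs (i + 1 + 1) := by
        rw [keyed_cons, hkey]
      obtain ⟨S', hS'⟩ :=
        foldl_add_cons_exists ((keyed xs (i + 1 + 1)).map (fun q => q.1)) (a - i) []
      have hset : PySem.Set.ofList (((a - i, a) :: keyed (x :: xs) (i + 1)).map (fun q => q.1))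
          = (a - i) :: S' := by
        rw [hK]
        simp only [List.map_cons, PySem.Set.ofList_eq_foldl, List.foldl_cons]
        rw [show PySem.Set.add (PySem.Set.add [] (a - i)) (a - i) = [a - i] by
          simp [PySem.Set.add, PySem.Set.contains]]
        exact hS'
      have hsetK : PySem.Set.ofList ((keyed (x :: xs) (i + 1)).map (fun q => q.1))
          = (a - i) :: S' := by
        rw [hK]
        simp only [List.map_cons, PySem.Set.ofList_eq_foldl, List.foldl_cons]
        rw [show PySem.Set.add [] (a - i) = [a - i] by
          simp [PySem.Set.add, PySem.Set.contains]]
        exact hS'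
      have hnodup := PySem.Set.nodup_ofList ((keyed (x :: xs) (i + 1)).map (fun q => q.1))
      rw [hsetK] at hnodup
      have hnotm : (a - i) ∉ S' := (List.nodup_cons.1 hnodup).1
      have hGK : Gfun (keyed (x :: xs) (i + 1))
          = ((keyed (x :: xs) (i + 1)).filter (fun q => q.1 == (a - i))).map (fun q => q.2)
            :: S'.map (fun k =>
                ((keyed (x :: xs) (i + 1)).filter (fun q => q.1 == k)).map (fun q => q.2)) := by
        rw [Gfun, hsetK]; simp
      have hGP : Gfun ((a - i, a) :: keyed (x :: xs) (i + 1))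
          = (a :: ((keyed (x :: xs) (i + 1)).filter (fun q => q.1 == (a - i))).map (fun q => q.2))
            :: S'.map (fun k =>
                ((keyed (x :: xs) (i + 1)).filter (fun q => q.1 == k)).map (fun q => q.2)) := by
        rw [Gfun, hset]
        simp only [List.map_cons]
        congr 1
        · simp
        · apply List.map_congr_left
          intro k hk
          have hne : ¬ ((a - i : Int) == k) = true := by
            simp
            rintro rfl
            exact hnotm hk
          simp [hne]
      rw [hshape] at ihx
      rw [hGK] at ihx
      obtain ⟨h1, h2⟩ := List.cons.inj ihx
      rw [hGP, h1, h2, groupsC_cons a x xs g gs hshape, if_pos h]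
    · -- fresh smaller key: a new singleton group in front
      have hfresh : ∀ q ∈ keyed (x :: xs) (i + 1), a - i < q.1 := by
        intro q hq
        have := key_ge_head xs x (i + 1) hpt q hq
        omega
      have hnm : (a - i) ∉ (keyed (x :: xs) (i + 1)).map (fun q => q.1) := by
        simp only [List.mem_map]
        rintro ⟨q, hq, hqe⟩
        have := hfresh q hq
        omega
      have hset : PySem.Set.ofList (((a - i, a) :: keyed (x :: xs) (i + 1)).map (fun q => q.1))
          = (a - i) :: PySem.Set.ofList ((keyed (x :: xs) (i + 1)).map (fun q => q.1)) := by
        simp only [List.map_cons, PySem.Set.ofList_eq_foldl, List.foldl_cons]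
        rw [show PySem.Set.add [] (a - i) = [a - i] by
          simp [PySem.Set.add, PySem.Set.contains]]
        exact foldl_add_cons_not_mem (a - i) hnm []
      rw [Gfun, hset]
      simp only [List.map_cons]
      have hg1 : (((a - i, a) :: keyed (x :: xs) (i + 1)).filter
            (fun q => q.1 == (a - i))).map (fun q => q.2) = [a] := by
        have hnil : (keyed (x :: xs) (i + 1)).filter (fun q => q.1 == (a - i)) = [] := by
          apply List.filter_eq_nil_iff.2
          intro q hq
          have := hfresh q hq
          simp
          omega
        simp [hnil]
      have hg2 : (PySem.Set.ofList ((keyed (x :: xs) (i + 1)).map (fun q => q.1))).map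
            (fun k => (((a - i, a) :: keyed (x :: xs) (i + 1)).filter
              (fun q => q.1 == k)).map (fun q => q.2))
          = Gfun (keyed (x :: xs) (i + 1)) := by
        rw [Gfun]
        apply List.map_congr_left
        intro k hk
        rw [PySem.Set.mem_ofList] at hk
        simp only [List.mem_map] at hk
        obtain ⟨q, hq, rfl⟩ := hk
        have hne : ¬ ((a - i : Int) == q.1) = true := by
          simp
          have := hfresh q hq
          omega
        simp [hne]
      rw [hg1, hg2, ihx, hshape, groupsC_cons a x xs g gs hshape, if_neg h]

-- indexing facts for B's pieces
theorem pyGetD_zero (x : Int) (l : List Int) : PySem.List.pyGetD (x :: l) 0 0 = (x :: l).headI := by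
  simp [PySem.List.pyGetD, PySem.List.pyGet?, PySem.List.pyIdx?]

theorem pyGetD_neg_one (x : Int) (l : List Int) :
    PySem.List.pyGetD (x :: l) (-1) 0 = (x :: l).getLastI := by
  simp only [PySem.List.pyGetD, PySem.List.pyGet?]
  have h1 : PySem.List.pyIdx? (x :: l).length (-1) = some l.length := by
    simp [PySem.List.pyIdx?]
  rw [h1, Option.bind]
  rw [show (x :: l)[l.length]? = (x :: l).getLast? by rw [List.getLast?_eq_getElem?]; simp]
  rw [List.getLastI_eq_getLast?_getD]
  cases hl : (x :: l).getLast? with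
  | none => simp at hl
  | some y => simp

-- ===== VERDICT (by name: the statement is the Claim_ definition above) =====
theorem runs_str_spec : Claim_equal_runs_str := by
  intro cards _ hpre
  unfold Spec_runs_str runs_str runs_str_alt
  by_cases hc : cards.isEmpty
  · simp [hc]
  · rw [if_neg (by simp_all), if_neg (by simp_all)]
    have hsne : PySem.List.sorted cards (fun x => x) ≠ [] := by
      rw [ne_eq, PySem.List.sorted_eq_nil_iff]
      intro h
      rw [h] at hc
      simp at hc
    have hle := PySem.List.sorted_pairwise cards (fun x => x)
    have hnd : (PySem.List.sorted cards (fun x => x)).Nodup :=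
      (PySem.List.sorted_perm cards (fun x => x) false).nodup_iff.2 hpre
    have hlt : (PySem.List.sorted cards (fun x => x)).Pairwise (· < ·) :=
      (List.Pairwise.and hle hnd).imp (fun h => lt_of_le_of_ne h.1 h.2)
    split
    next heq => exact absurd heq hsne
    next a t heq =>
      rw [heq] at hlt
      rw [heq]
      dsimp only []
      -- A's side: the appended runs list, then the pieces map
      rw [PySem.List.foldl_append_singleton_eq_map
            (fun p : Int × Int => if p.1 = p.2 then PySem.Int.toStr p.1
              else PySem.Int.toStr p.1 ++ "-" ++ PySem.Int.toStr p.2) _ [],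
          List.nil_append, foldA t [] a a, List.nil_append, fruns_eq_groupsC t a,
          List.map_map]
      -- B's side: the dict fold over the keyed list
      have hfold : List.foldl
            (fun (d : PySem.Dict Int (List Int)) p => d.modify (p.2 - p.1) [] (fun g => g ++ [p.2]))
            PySem.Dict.empty (PySem.List.enumerate (a :: t))
          = List.foldl
            (fun (d : PySem.Dict Int (List Int)) q => d.modify q.1 [] (fun g => g ++ [q.2]))
            PySem.Dict.empty (keyed (a :: t) 0) := by
        rw [keyed, List.foldl_map]
      rw [hfold]
      set d := List.foldl
        (fun (d : PySem.Dict Int (List Int)) q => d.modify q.1 [] (fun g => g ++ [q.2]))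
        PySem.Dict.empty (keyed (a :: t) 0) with hd
      have hkeys : d.keys = PySem.Set.ofList ((keyed (a :: t) 0).map (fun q => q.1)) := by
        rw [hd, PySem.Dict.keys_foldl_modify_key (keyed (a :: t) 0) (fun q => q.1) []
          (fun _ q => (fun g => g ++ [q.2])) PySem.Dict.empty]
        rfl
      have hndk : d.keys.Nodup := by
        rw [hkeys]
        exact PySem.Set.nodup_ofList _
      have hvals : d.values = Gfun (keyed (a :: t) 0) := by
        rw [PySem.Dict.values_eq_map_keys d hndk [], hkeys, Gfun]
        apply List.map_congr_left
        intro k _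
        rw [hd, PySem.Dict.getD_foldl_modify_append (keyed (a :: t) 0) PySem.Dict.empty k]
        simp [PySem.Dict.getD_empty]
      rw [hvals, Gfun_keyed_eq_groupsC t a 0 hlt]
      -- pieces agree group by group
      congr 1
      apply List.map_congr_left
      intro g hg
      obtain ⟨hne, hlast⟩ := groupsC_last (a :: t) g hg
      obtain ⟨y, l, rfl⟩ := List.exists_cons_of_ne_nil hne
      simp only [Function.comp]
      rw [pyGetD_zero, pyGetD_neg_one]
      by_cases hlen : (y :: l).length = 1
      · have hh : (y :: l).headI = (y :: l).getLastI := by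
          rw [hlast, hlen]
          simp
        simp [hlen, hh]
      · have hh : y ≠ (y :: l).getLastI := by
          have h2 : (y :: l).headI ≠ (y :: l).getLastI := by
            rw [hlast]
            have h1 : (1 : Int) < ((y :: l).length : Int) := by
              have h3 : (y :: l).length ≠ 1 := hlen
              have h4 := List.length_pos_of_ne_nil hne
              omega
            omega
          intro hcontra
          exact h2 (by simpa using hcontra)
        have hlnil : l ≠ [] := by
          intro h
          subst h
          simp at hlen
        simp [hh, hlnil]
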